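-- pv_equiv track=rewrite | github.com/dskim-git/math | auth_utils.py | _parse_roster_flat
-- ===== SOURCE A (Python) =====
-- def _parse_roster_flat(all_values: list) -> list[dict]:
--     """형식 A: 첫 행이 헤더인 단순 세로 목록 파싱."""
--     headers_row = all_values[0]
--     valid_idx = [i for i, h in enumerate(headers_row) if str(h).strip()]
--     headers = [str(headers_row[i]).strip() for i in valid_idx]
--     result = []
--     for row in all_values[1:]:
--         if not any(row):
--             continue
--         record = {headers[j]: (str(row[valid_idx[j]]).strip() if valid_idx[j] < len(row) else "")
--                   for j in range(len(headers))}
--         result.append(record)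
--     return result
-- ===== SOURCE B (Python) =====
-- def _parse_roster_flat(all_values: list) -> list[dict]:
--     """형식 A: 첫 행이 헤더인 단순 세로 목록 파싱 (column-major: fill all records one column at a time)."""
--     headers_row = all_values[0]
--     rows = [r for r in all_values[1:] if any(r)]
--     records = [{} for _ in rows]
--     for i, h in enumerate(headers_row):
--         key = str(h).strip()
--         if not key:
--             continue
--         for rec, row in zip(records, rows):
--             rec[key] = str(row[i]).strip() if i < len(row) else ""
--     return records
-- ===== Notes on version B (the rewrite author's own statement) =====
-- stated objective: alternative
-- what changed: A is row-major: it precomputes valid_idx/headers tables and builds each record separately by an indexed dict comprehension per row; B is column-major: it filters the rows once, creates all (initially empty) records up front, and fills every record simultaneously one header column at a time via zip(records, rows), with inline header validation.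
import Mathlib
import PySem

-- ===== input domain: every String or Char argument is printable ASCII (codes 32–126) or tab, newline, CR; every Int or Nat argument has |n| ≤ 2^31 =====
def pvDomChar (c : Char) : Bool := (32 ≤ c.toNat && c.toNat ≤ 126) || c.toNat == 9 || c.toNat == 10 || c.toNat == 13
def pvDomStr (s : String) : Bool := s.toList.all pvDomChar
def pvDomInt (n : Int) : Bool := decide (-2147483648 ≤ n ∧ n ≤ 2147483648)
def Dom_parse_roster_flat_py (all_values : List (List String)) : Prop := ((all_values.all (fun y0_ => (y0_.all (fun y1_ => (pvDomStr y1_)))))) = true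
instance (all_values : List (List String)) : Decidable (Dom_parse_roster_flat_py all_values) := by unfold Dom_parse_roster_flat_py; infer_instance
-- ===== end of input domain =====

-- B replaces A's row-major indexed pass over precomputed valid_idx/headers tables by a
-- column-major fill: all records are built simultaneously, one header column at a time
-- (objective: alternative); return values proved equal on nonempty input.


-- ===== PORT A =====
-- record comprehension {headers[j]: … for j in range(len(headers))}; row elements are strings so str() is identity
def pvRecordA (valid_idx : List Int) (headers : List String) (row : List String) :
    PySem.Dict String String :=
  (PySem.List.pyRange 0 (headers.length : Int) 1).foldl
    (fun d j =>
      d.insert (PySem.List.pyGetD headers j "")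
        (if PySem.List.pyGetD valid_idx j 0 < (row.length : Int) then
          PySem.Str.strip (PySem.List.pyGetD row (PySem.List.pyGetD valid_idx j 0) "") else ""))
    PySem.Dict.empty

def parse_roster_flat_py (all_values : List (List String)) : List (List (String × String)) :=
  match PySem.List.pyGet? all_values 0 with   -- all_values[0]: IndexError on [] (excluded by Pre_)
  | none => []
  | some headers_row =>
    let valid_idx : List Int :=
      ((PySem.List.enumerate headers_row 0).filter
        (fun p => !(PySem.Str.strip p.2 == ""))).map (·.1)
    let headers : List String :=
      valid_idx.map (fun i => PySem.Str.strip (PySem.List.pyGetD headers_row i ""))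
    (PySem.List.slice all_values (some 1) none).foldl
      (fun result row =>
        if row.any (fun s => !(s == "")) then
          result ++ [(pvRecordA valid_idx headers row).items]
        else result) []

-- ===== PORT B =====
-- column-major: rows filtered once; for each header column (skipping blank headers) the
-- value of that column is written into every record via zip(records, rows)
def parse_roster_flat_py_alt (all_values : List (List String)) : List (List (String × String)) :=
  match PySem.List.pyGet? all_values 0 with   -- all_values[0] raises on [] (excluded by Pre_)
  | none => []
  | some headers_row =>
    let rows : List (List String) :=
      (PySem.List.slice all_values (some 1) none).filter
        (fun r => r.any (fun s => !(s == "")))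
    let records : List (PySem.Dict String String) :=
      (PySem.List.enumerate headers_row 0).foldl
        (fun recs p =>
          let key := PySem.Str.strip p.2
          if key == "" then recs
          else
            List.zipWith (fun rec row =>
              PySem.Dict.insert rec key
                (if p.1 < (row.length : Int) then
                  PySem.Str.strip (PySem.List.pyGetD row p.1 "") else ""))
              recs rows)
        (rows.map (fun _ => PySem.Dict.empty))
    records.map PySem.Dict.items

-- ===== PRECONDITION & SPEC =====
-- Pre_ excludes only the empty list, on which both Pythons raise IndexError at all_values[0].
def Pre_parse_roster_flat_py (all_values : List (List String)) : Prop := all_values ≠ []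
instance (all_values : List (List String)) : Decidable (Pre_parse_roster_flat_py all_values) := by
  unfold Pre_parse_roster_flat_py; infer_instance
def pvWitness_parse_roster_flat_py : List (List String) := [["name", "", "age"], ["kim", "x", "7"]]

def Spec_parse_roster_flat_py (all_values : List (List String)) (out : List (List (String × String))) : Prop := out = parse_roster_flat_py_alt all_values
instance (all_values : List (List String)) (out : List (List (String × String))) : Decidable (Spec_parse_roster_flat_py all_values out) := by unfold Spec_parse_roster_flat_py; infer_instance

-- ===== CLAIM (what is proved, stated in full; the proofs are below) =====
def Claim_equal_parse_roster_flat_py : Prop := ∀ (all_values : List (List String)), Dom_parse_roster_flat_py all_values → Pre_parse_roster_flat_py all_values → Spec_parse_roster_flat_py all_values (parse_roster_flat_py all_values)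

-- ===== LEMMAS AND PROOFS =====

-- B's per-row record (the column walk restricted to one row), used as the bridge between the two ports
def pvRecordB (headers_row : List String) (row : List String) : PySem.Dict String String :=
  (PySem.List.enumerate headers_row 0).foldl
    (fun d p =>
      if PySem.Str.strip p.2 == "" then d
      else
        d.insert (PySem.Str.strip p.2)
          (if p.1 < (row.length : Int) then PySem.Str.strip (PySem.List.pyGetD row p.1 "") else ""))
    PySem.Dict.empty

-- zipWith over (map g l) and l is a map
theorem pv_zipWith_map_self {α β γ : Type} (f : β → α → γ) (g : α → β) (l : List α) :
    List.zipWith f (l.map g) l = l.map (fun x => f (g x) x) := by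
  induction l with
  | nil => rfl
  | cons a t ih => simp [ih]

-- exchange lemma: the column-major fold over a simultaneous record list equals the
-- row-major map of the per-row column fold
theorem pv_col_row_exchange {C R D : Type} (cols : List C) (rows : List R)
    (P : C → Bool) (f : C → D → R → D) (g : R → D) :
    cols.foldl
      (fun recs c => if P c then recs else List.zipWith (fun d row => f c d row) recs rows)
      (rows.map g)
    = rows.map (fun row => cols.foldl (fun d c => if P c then d else f c d row) (g row)) := by
  induction cols generalizing g with
  | nil => rfl
  | cons c cs ih =>
    simp only [List.foldl_cons]
    by_cases h : P c = true
    · rw [if_pos h, ih g]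
      exact List.map_congr_left (fun row _ => by rw [if_pos h])
    · rw [if_neg h, pv_zipWith_map_self, ih (fun row => f c (g row) row)]
      exact List.map_congr_left (fun row _ => by rw [if_neg h])

-- The per-row dicts agree: A's indexed pass over its tables equals B's direct column walk.
theorem pvRecord_eq (hs row : List String) :
    pvRecordA
      (((PySem.List.enumerate hs 0).filter (fun p => !(PySem.Str.strip p.2 == ""))).map (·.1))
      ((((PySem.List.enumerate hs 0).filter (fun p => !(PySem.Str.strip p.2 == ""))).map (·.1)).map
        (fun i => PySem.Str.strip (PySem.List.pyGetD hs i "")))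
      row
    = pvRecordB hs row := by
  unfold pvRecordA pvRecordB
  set enumF := (PySem.List.enumerate hs 0).filter (fun p => !(PySem.Str.strip p.2 == "")) with henumF
  set vidx := enumF.map (·.1) with hvidx
  set g : Int → String := fun i => PySem.Str.strip (PySem.List.pyGetD hs i "") with hg
  set val : Int → String := fun vi =>
    if vi < (row.length : Int) then PySem.Str.strip (PySem.List.pyGetD row vi "") else "" with hval
  set xs := vidx.map (fun i => (g i, i)) with hxs
  have hlen : ((vidx.map g).length : Int) = (xs.length : Int) := by simp [hxs]
  have hcong := PySem.List.foldl_congr_mem (PySem.List.pyRange 0 (xs.length : Int) 1)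
    (fun d j =>
      d.insert (PySem.List.pyGetD (vidx.map g) j "")
        (if PySem.List.pyGetD vidx j 0 < (row.length : Int) then
          PySem.Str.strip (PySem.List.pyGetD row (PySem.List.pyGetD vidx j 0) "") else ""))
    (fun d j => (fun (d : PySem.Dict String String) (pr : String × Int) =>
        d.insert pr.1 (val pr.2)) d (PySem.List.pyGetD xs j ("", 0)))
    PySem.Dict.empty
    (by
      intro acc j hj
      rw [PySem.List.mem_pyRange_one] at hj
      have hjv : j < (vidx.length : Int) := by
        have h := hj.2; rw [hxs, List.length_map] at h; exact h
      have hjn : j.toNat < vidx.length := by omega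
      have h1 : PySem.List.pyGetD (vidx.map g) j "" = g (vidx[j.toNat]'hjn) := by
        rw [PySem.List.pyGetD_eq_getElem _ _ hj.1 (by rw [List.length_map]; exact hjv)]
        simp only [List.getElem_map]
      have h2 : PySem.List.pyGetD vidx j 0 = vidx[j.toNat]'hjn :=
        PySem.List.pyGetD_eq_getElem _ _ hj.1 hjv
      have h3 : PySem.List.pyGetD xs j ("", 0) = (g (vidx[j.toNat]'hjn), vidx[j.toNat]'hjn) := by
        rw [PySem.List.pyGetD_eq_getElem _ _ hj.1 hj.2]
        simp only [hxs, List.getElem_map]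
      simp only [h1, h2, h3, hval])
  rw [hlen, hcong]
  have := PySem.List.foldl_pyRange_zero_pyGetD' xs ("", 0)
    (fun (d : PySem.Dict String String) (pr : String × Int) => d.insert pr.1 (val pr.2))
    PySem.Dict.empty
  rw [this]
  rw [hxs, List.foldl_map, hvidx, List.foldl_map]
  have hflip :
      (fun (d : PySem.Dict String String) (p : Int × String) =>
        if PySem.Str.strip p.2 == "" then d
        else
          d.insert (PySem.Str.strip p.2)
            (if p.1 < (row.length : Int) then PySem.Str.strip (PySem.List.pyGetD row p.1 "") else ""))
      = (fun (d : PySem.Dict String String) (p : Int × String) =>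
        if !(PySem.Str.strip p.2 == "") then
          d.insert (PySem.Str.strip p.2)
            (if p.1 < (row.length : Int) then PySem.Str.strip (PySem.List.pyGetD row p.1 "") else "")
        else d) := by
    funext d p
    by_cases h : PySem.Str.strip p.2 = "" <;> simp [h]
  rw [hflip, ← List.foldl_filter, ← henumF]
  refine PySem.List.foldl_congr_mem _ _ _ _ ?_
  intro acc p hp
  have hpe := (List.mem_filter.mp (henumF ▸ hp)).1
  rw [PySem.List.mem_enumerate_iff] at hpe
  obtain ⟨k, hk, hpk⟩ := hpe
  have hidx : PySem.List.pyGetD hs p.1 "" = p.2 := by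
    rw [hpk]
    rw [show (0 + (k : Int)) = ((k : Nat) : Int) by omega]
    simp [hk]
  simp only [hg, hval, hidx]

theorem parse_roster_flat_py_spec : Claim_equal_parse_roster_flat_py := by
  intro all_values hdom hpre
  unfold Spec_parse_roster_flat_py
  unfold parse_roster_flat_py parse_roster_flat_py_alt
  cases hcase : PySem.List.pyGet? all_values 0 with
  | none => rfl
  | some hs =>
    simp only []
    -- A side: foldl-append-if over the tail = filter-then-map
    rw [PySem.List.foldl_append_if
      (l := PySem.List.slice all_values (some 1) none)
      (fun row => row.any (fun s => !(s == "")))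
      (fun row => (pvRecordA _ _ row).items) []]
    simp only [List.nil_append]
    -- B side: exchange column-major fold into row-major map, then per-row equality
    have hx := pv_col_row_exchange (PySem.List.enumerate hs 0)
      ((PySem.List.slice all_values (some 1) none).filter (fun r => r.any (fun s => !(s == ""))))
      (fun p => PySem.Str.strip p.2 == "")
      (fun p d row =>
        PySem.Dict.insert d (PySem.Str.strip p.2)
          (if p.1 < (row.length : Int) then
            PySem.Str.strip (PySem.List.pyGetD row p.1 "") else ""))
      (fun _ => PySem.Dict.empty)
    beta_reduce at hx
    rw [hx]
    conv_rhs => rw [List.map_map]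
    refine List.map_congr_left (fun row _ => ?_)
    simp only [Function.comp]
    rw [pvRecord_eq hs row]
    rfl
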